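-- pv_equiv track=rewrite | github.com/Thormes/advent-of-code | 2024/day4/day4_solution.py | get_matrices
-- ===== SOURCE A (Python) =====
-- def get_matrices(matrix, size):
--     result = []
--     for i in range(len(matrix) - size + 1):
--         for j in range(len(matrix[0]) - size + 1):
--             mat = []
--             for n in range(size):
--                 mat.append(matrix[i + n][j:j + size])
--             result.append(mat)
--     return result
-- ===== SOURCE B (Python) =====
-- def get_matrices(matrix, size):
--     # Phase 1: table of all horizontal windows of each row.
--     row_win = [[row[j:j + size] for j in range(len(matrix[0]) - size + 1)] for row in matrix]
--     # Phase 2: stack `size` consecutive row-windows for each (i, j), copying each slice.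
--     return [[list(row_win[i + n][j]) for n in range(size)]
--             for i in range(len(matrix) - size + 1)
--             for j in range(len(matrix[0]) - size + 1)]
-- ===== Notes on version B (the rewrite author's own statement) =====
-- stated objective: alternative
-- what changed: Replaced A's triple nested append-loop by a two-phase decomposition: first precompute a table of all horizontal row-windows, then assemble each submatrix by stacking and copying size consecutive entries of that table via a flat comprehension.
import Mathlib
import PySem

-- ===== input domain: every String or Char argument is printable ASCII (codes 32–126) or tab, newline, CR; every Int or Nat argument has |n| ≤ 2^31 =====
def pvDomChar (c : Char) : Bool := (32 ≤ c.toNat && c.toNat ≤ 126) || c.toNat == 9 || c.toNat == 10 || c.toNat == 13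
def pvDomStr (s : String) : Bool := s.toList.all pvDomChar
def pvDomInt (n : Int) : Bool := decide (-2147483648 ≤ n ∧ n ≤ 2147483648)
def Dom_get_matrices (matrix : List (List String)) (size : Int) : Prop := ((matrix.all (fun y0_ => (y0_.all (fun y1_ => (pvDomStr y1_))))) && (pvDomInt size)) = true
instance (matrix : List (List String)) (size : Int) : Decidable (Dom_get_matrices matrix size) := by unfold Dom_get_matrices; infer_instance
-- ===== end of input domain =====

-- ===== PORT A =====
-- B is a two-phase decomposition of A (row-window table, then stacking); same asymptotic cost.
-- Pre_ excludes only the inputs (empty matrix with size <= 0) on which Python A raises IndexError.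
def get_matrices (matrix : List (List String)) (size : Int) : List (List (List String)) :=
  (PySem.List.pyRange 0 ((matrix.length : Int) - size + 1) 1).foldl (fun result i =>
    (PySem.List.pyRange 0 (((matrix.headD []).length : Int) - size + 1) 1).foldl (fun result j =>
      let mat := (PySem.List.pyRange 0 size 1).foldl (fun mat n =>
        mat ++ [PySem.List.slice (PySem.List.pyGetD matrix (i + n) []) (some j) (some (j + size))]) []
      result ++ [mat]) result) []

-- ===== PORT B =====
def get_matrices_alt (matrix : List (List String)) (size : Int) : List (List (List String)) :=
  let row_win := matrix.map (fun row =>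
    (PySem.List.pyRange 0 (((matrix.headD []).length : Int) - size + 1) 1).map (fun j =>
      PySem.List.slice row (some j) (some (j + size))))
  (PySem.List.pyRange 0 ((matrix.length : Int) - size + 1) 1).flatMap (fun i =>
    (PySem.List.pyRange 0 (((matrix.headD []).length : Int) - size + 1) 1).map (fun j =>
      (PySem.List.pyRange 0 size 1).map (fun n =>
        PySem.List.pyGetD (PySem.List.pyGetD row_win (i + n) []) j [])))

-- ===== PRECONDITION & SPEC =====
-- Pre_ excludes exactly the inputs where Python A raises IndexError (matrix == [] and size <= 0).
def Pre_get_matrices (matrix : List (List String)) (size : Int) : Prop := matrix ≠ [] ∨ 0 < size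
instance (matrix : List (List String)) (size : Int) : Decidable (Pre_get_matrices matrix size) := by unfold Pre_get_matrices; infer_instance
def pvWitness_get_matrices : List (List String) × Int := ([["a", "b"], ["c", "d"]], 2)

def Spec_get_matrices (matrix : List (List String)) (size : Int) (out : List (List (List String))) : Prop := out = get_matrices_alt matrix size
instance (matrix : List (List String)) (size : Int) (out : List (List (List String))) : Decidable (Spec_get_matrices matrix size out) := by unfold Spec_get_matrices; infer_instance

-- ===== CLAIM (what is proved, stated in full; the proofs are below) =====
def Claim_equal_get_matrices : Prop := ∀ (matrix : List (List String)) (size : Int), Dom_get_matrices matrix size → Pre_get_matrices matrix size → Spec_get_matrices matrix size (get_matrices matrix size)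

-- ===== LEMMAS AND PROOFS =====

-- ===== VERDICT (by name: the statement is the Claim_ definition above) =====
theorem get_matrices_core : ∀ (matrix : List (List String)) (size : Int),
    get_matrices matrix size = get_matrices_alt matrix size := by
  intro matrix size
  unfold get_matrices get_matrices_alt
  simp only [PySem.List.foldl_append_singleton_eq_map, PySem.List.foldl_append_eq_flatMap,
    List.nil_append]
  apply List.flatMap_congr
  intro i hi
  apply List.map_congr_left
  intro j hj
  apply List.map_congr_left
  intro n hn
  rw [PySem.List.mem_pyRange_one] at hi hj hn
  rw [PySem.List.pyGetD_eq_getElem (List.map (fun row =>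
        List.map (fun j => PySem.List.slice row (some j) (some (j + size)))
          (PySem.List.pyRange 0 (((matrix.headD []).length : Int) - size + 1) 1)) matrix) _
        (show (0:Int) ≤ i + n by omega) (by push_cast [List.length_map]; omega)]
  rw [List.getElem_map]
  rw [PySem.List.pyGetD_map_pyRange_of_nonneg _ _ _ _ hj.1 (by omega)]
  rw [PySem.List.pyGetD_eq_getElem matrix _ (show (0:Int) ≤ i + n by omega) (by omega)]

theorem get_matrices_spec : Claim_equal_get_matrices := by
  intro matrix size _ _
  unfold Spec_get_matrices
  exact get_matrices_core matrix size
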